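-- pv_equiv track=rewrite | github.com/LyttonFeng/pinchbench-skill | rl/train/build_task16_variant_prompts.py | _select_targeted_val_entries
-- ===== SOURCE A (Python) =====
-- def _select_targeted_val_entries(
--     prompt_entries: list[tuple[str, str]],
--     base_val_count: int,
-- ) -> list[tuple[str, str]]:
--     selected: list[tuple[str, str]] = []
--
--     # Keep a small amount of plain/base validation so val does not become only schema-driven.
--     base_seen = 0
--     for group, prompt in prompt_entries:
--         if group == "base" and base_seen < max(0, base_val_count):
--             selected.append((group, prompt))
--             base_seen += 1
--
--     # Cover the newer targeted capabilities explicitly.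
--     targeted_order = [
--         "incident_linkage",
--         "email13_priority",
--         "bigclient_weighting",
--         "security_weighting",
--         "incident_graph",
--         "priority_propagation",
--         "report_schema_incident_groups",
--         "report_schema_priority_fields",
--     ]
--     for wanted_group in targeted_order:
--         for group, prompt in prompt_entries:
--             if group == wanted_group:
--                 selected.append((group, prompt))
--                 break
--
--     return selected
-- ===== SOURCE B (Python) =====
-- def _select_targeted_val_entries(
--     prompt_entries: list[tuple[str, str]],
--     base_val_count: int,
-- ) -> list[tuple[str, str]]:
--     targeted_order = [
--         "incident_linkage",
--         "email13_priority",
--         "bigclient_weighting",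
--         "security_weighting",
--         "incident_graph",
--         "priority_propagation",
--         "report_schema_incident_groups",
--         "report_schema_priority_fields",
--     ]
--     # Base part: slice of a filter instead of a counted loop.
--     base_part = [entry for entry in prompt_entries if entry[0] == "base"][: max(0, base_val_count)]
--     # Targeted part: collect first occurrences in ENCOUNTER order in one pass,
--     # then sort them by their rank in targeted_order (stable sort; ranks are distinct,
--     # so this yields exactly the targeted_order ordering, missing groups simply absent).
--     firsts: list[tuple[str, str]] = []
--     seen: set[str] = set()
--     for group, prompt in prompt_entries:
--         if group in targeted_order and group not in seen:
--             seen.add(group)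
--             firsts.append((group, prompt))
--     firsts.sort(key=lambda entry: targeted_order.index(entry[0]))
--     return base_part + firsts
-- ===== Notes on version B (the rewrite author's own statement) =====
-- stated objective: alternative
-- what changed: Replaces A's counted base loop and eight nested per-group scans with: a slice of a filter for the base part, plus one pass collecting first occurrences of targeted groups in encounter order followed by a sort keyed on the group's rank in targeted_order.
import Mathlib
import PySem

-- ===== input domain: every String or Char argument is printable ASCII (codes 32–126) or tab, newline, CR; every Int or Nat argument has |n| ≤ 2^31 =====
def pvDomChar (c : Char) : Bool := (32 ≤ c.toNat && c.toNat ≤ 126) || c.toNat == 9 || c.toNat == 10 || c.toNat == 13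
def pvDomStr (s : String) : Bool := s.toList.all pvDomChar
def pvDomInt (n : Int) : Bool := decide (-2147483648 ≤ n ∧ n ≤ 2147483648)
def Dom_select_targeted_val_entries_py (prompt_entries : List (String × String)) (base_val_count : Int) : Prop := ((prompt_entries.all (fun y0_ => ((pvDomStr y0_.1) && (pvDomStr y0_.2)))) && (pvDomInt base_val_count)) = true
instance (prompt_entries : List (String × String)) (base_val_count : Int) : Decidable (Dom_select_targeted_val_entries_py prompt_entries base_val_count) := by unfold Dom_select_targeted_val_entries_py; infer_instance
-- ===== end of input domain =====

-- B replaces A's counted base loop and eight nested per-group scans by a slice of a filter plus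
-- one first-occurrence pass sorted by rank in targeted_order; return-value equivalence is proved.


-- ===== PORT A =====
-- A: first loop collects base entries while base_seen < max(0, base_val_count);
-- then for each name in targeted_order an inner scan with break (= find? of the first match).
def select_targeted_val_entries_py (prompt_entries : List (String × String)) (base_val_count : Int) : List (String × String) :=
  let st := prompt_entries.foldl
    (fun (st : List (String × String) × Int) e =>
      if e.1 == "base" && decide (st.2 < max 0 base_val_count) then (st.1 ++ [e], st.2 + 1) else st)
    ([], 0)
  let targeted_order : List String :=
    ["incident_linkage", "email13_priority", "bigclient_weighting", "security_weighting",
     "incident_graph", "priority_propagation", "report_schema_incident_groups",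
     "report_schema_priority_fields"]
  targeted_order.foldl
    (fun sel w =>
      match prompt_entries.find? (fun e => e.1 == w) with
      | some e => sel ++ [e]
      | none => sel)
    st.1

-- ===== PORT B =====
-- the constant targeted_order list of B
def pvTgt : List String :=
  ["incident_linkage", "email13_priority", "bigclient_weighting", "security_weighting",
   "incident_graph", "priority_propagation", "report_schema_incident_groups",
   "report_schema_priority_fields"]

-- B: base part = filter then slice [:max 0 c] (take is exact: the bound is ≥ 0);
-- targeted part = one pass collecting first occurrences in encounter order (seen : set),
-- then a stable sort by rank targeted_order.index(group) (the .index never raises here since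
-- every collected group is in targeted_order; ported as index?.getD 0, unreachable default).
def select_targeted_val_entries_py_alt (prompt_entries : List (String × String)) (base_val_count : Int) : List (String × String) :=
  let base_part := (prompt_entries.filter (fun e => e.1 == "base")).take (max 0 base_val_count).toNat
  let firsts := (prompt_entries.foldl
      (fun (st : List (String × String) × PySem.Set String) e =>
        if pvTgt.contains e.1 && !(PySem.Set.contains st.2 e.1)
        then (st.1 ++ [e], PySem.Set.add st.2 e.1) else st)
      ([], PySem.Set.empty)).1
  base_part ++ PySem.List.sorted firsts (fun e => (PySem.List.index? pvTgt e.1).getD 0) false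

-- ===== PRECONDITION & SPEC =====
def Spec_select_targeted_val_entries_py (prompt_entries : List (String × String)) (base_val_count : Int) (out : List (String × String)) : Prop := out = select_targeted_val_entries_py_alt prompt_entries base_val_count
instance (prompt_entries : List (String × String)) (base_val_count : Int) (out : List (String × String)) : Decidable (Spec_select_targeted_val_entries_py prompt_entries base_val_count out) := by unfold Spec_select_targeted_val_entries_py; infer_instance

-- ===== CLAIM =====
def Claim_equal_select_targeted_val_entries_py : Prop := ∀ (prompt_entries : List (String × String)) (base_val_count : Int), Dom_select_targeted_val_entries_py prompt_entries base_val_count → Spec_select_targeted_val_entries_py prompt_entries base_val_count (select_targeted_val_entries_py prompt_entries base_val_count)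

-- ===== LEMMAS AND PROOFS =====

-- A's counted base loop equals "take (cap - cnt) of the base filter".
theorem pv_base_loop (cap : Int) :
    ∀ (pe : List (String × String)) (sel : List (String × String)) (cnt : Int),
      (pe.foldl
        (fun (st : List (String × String) × Int) e =>
          if e.1 == "base" && decide (st.2 < cap) then (st.1 ++ [e], st.2 + 1) else st)
        (sel, cnt)).1
      = sel ++ (pe.filter (fun e => e.1 == "base")).take (cap - cnt).toNat := by
  intro pe
  induction pe with
  | nil => intro sel cnt; simp
  | cons e pe ih =>
    intro sel cnt
    simp only [List.foldl_cons, List.filter_cons]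
    by_cases hb : (e.1 == "base") = true
    · by_cases hc : cnt < cap
      · rw [if_pos (by simp [hb, hc]), ih]
        have h1 : (cap - cnt).toNat = (cap - (cnt + 1)).toNat + 1 := by omega
        simp [hb, h1, List.take_succ_cons]
      · rw [if_neg (by simp [hb, hc]), ih]
        have h1 : (cap - cnt).toNat = 0 := by omega
        simp [hb, h1]
    · rw [if_neg (by simp [hb]), ih]
      simp [hb]

-- A's targeted loop (append first match or nothing) is init ++ filterMap.
theorem pv_tgt_loop (pe : List (String × String)) :
    ∀ (l : List String) (init : List (String × String)),
      l.foldl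
        (fun sel w =>
          match pe.find? (fun e => e.1 == w) with
          | some e => sel ++ [e]
          | none => sel)
        init
      = init ++ l.filterMap (fun w => pe.find? (fun e => e.1 == w)) := by
  intro l
  induction l with
  | nil => intro init; simp
  | cons w l ih =>
    intro init
    simp only [List.foldl_cons, List.filterMap_cons]
    rcases h : pe.find? (fun e => e.1 == w) with _ | e <;> simp [h, ih]

-- The first-occurrence collection pass: membership and key-nodup characterization.
theorem pv_firsts_spec :
    ∀ (pe : List (String × String)) (acc : List (String × String)) (seen : PySem.Set String),
      (∀ x, PySem.Set.contains seen x = acc.any (fun e => e.1 == x)) →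
      ((acc.map Prod.fst).Nodup) →
      (∀ e' : String × String,
        (e' ∈ (pe.foldl
          (fun (st : List (String × String) × PySem.Set String) e =>
            if pvTgt.contains e.1 && !(PySem.Set.contains st.2 e.1)
            then (st.1 ++ [e], PySem.Set.add st.2 e.1) else st)
          (acc, seen)).1)
        ↔ (e' ∈ acc ∨ (pvTgt.contains e'.1 = true ∧ acc.any (fun e => e.1 == e'.1) = false ∧
              pe.find? (fun e => e.1 == e'.1) = some e')))
      ∧ (((pe.foldl
          (fun (st : List (String × String) × PySem.Set String) e =>
            if pvTgt.contains e.1 && !(PySem.Set.contains st.2 e.1)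
            then (st.1 ++ [e], PySem.Set.add st.2 e.1) else st)
          (acc, seen)).1.map Prod.fst).Nodup) := by
  intro pe
  induction pe with
  | nil =>
    intro acc seen _ hnd
    refine ⟨fun e' => ?_, hnd⟩
    simp
  | cons e pe ih =>
    intro acc seen hseen hnd
    simp only [List.foldl_cons]
    by_cases hc : (pvTgt.contains e.1 && !(PySem.Set.contains seen e.1)) = true
    · rw [if_pos hc]
      rw [Bool.and_eq_true] at hc
      have hct : pvTgt.contains e.1 = true := hc.1
      have hnot : acc.any (fun x => x.1 == e.1) = false := by
        rw [← hseen]; simpa using hc.2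
      have hseen' : ∀ x, PySem.Set.contains (PySem.Set.add seen e.1) x
          = (acc ++ [e]).any (fun y => y.1 == x) := by
        intro x
        by_cases hx : x ∈ PySem.Set.add seen e.1
        · rw [(PySem.Set.contains_iff _ x).mpr hx]
          rcases (PySem.Set.mem_add seen e.1 x).mp hx with h | h
          · have h2 : PySem.Set.contains seen x = true := (PySem.Set.contains_iff _ x).mpr h
            rw [hseen] at h2
            simp only [List.any_append, h2, Bool.true_or]
          · subst h
            simp
        · have h1 : PySem.Set.contains (PySem.Set.add seen e.1) x = false := by
            cases h : PySem.Set.contains (PySem.Set.add seen e.1) x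
            · rfl
            · exact absurd ((PySem.Set.contains_iff _ x).mp h) hx
          rw [h1]
          have hns : x ∉ seen := fun h => hx ((PySem.Set.mem_add seen e.1 x).mpr (Or.inl h))
          have hne : x ≠ e.1 := fun h => hx ((PySem.Set.mem_add seen e.1 x).mpr (Or.inr h))
          have h2 : PySem.Set.contains seen x = false := by
            cases h : PySem.Set.contains seen x
            · rfl
            · exact absurd ((PySem.Set.contains_iff _ x).mp h) hns
          rw [hseen] at h2
          simp only [List.any_append, h2, List.any_cons, List.any_nil, Bool.false_or, Bool.or_false]
          simpa using Ne.symm hne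
      have hniq : e.1 ∉ acc.map Prod.fst := by
        intro hmem
        rcases List.mem_map.mp hmem with ⟨y, hy, hy1⟩
        have hany : acc.any (fun x => x.1 == e.1) = true :=
          List.any_eq_true.mpr ⟨y, hy, by simp [hy1]⟩
        rw [hnot] at hany; exact absurd hany (by simp)
      have hnd' : ((acc ++ [e]).map Prod.fst).Nodup := by
        simp only [List.map_append, List.map_cons, List.map_nil]
        rw [List.nodup_append]
        refine ⟨hnd, List.nodup_singleton _, ?_⟩
        intro a ha b hb
        rw [List.mem_singleton] at hb
        subst hb
        intro hab
        exact hniq (hab ▸ ha)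
      rcases ih (acc ++ [e]) (PySem.Set.add seen e.1) hseen' hnd' with ⟨hm, hn⟩
      refine ⟨fun e' => ?_, hn⟩
      rw [hm e']
      constructor
      · rintro (h | ⟨ht, hna, hf⟩)
        · rcases List.mem_append.mp h with h | h
          · exact Or.inl h
          · have he : e' = e := by simpa using h
            subst he
            exact Or.inr ⟨hct, hnot, List.find?_cons_of_pos (by simp)⟩
        · have hne : (e.1 == e'.1) = false := by
            cases h : (e.1 == e'.1)
            · rfl
            · exfalso
              have he1 : e.1 = e'.1 := eq_of_beq h
              have : (acc ++ [e]).any (fun x => x.1 == e'.1) = true := by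
                simp [he1]
              rw [this] at hna; exact absurd hna (by simp)
          refine Or.inr ⟨ht, ?_, ?_⟩
          · simp only [List.any_append, List.any_cons, List.any_nil, Bool.or_false] at hna
            exact (Bool.or_eq_false_iff.mp hna).1
          · rw [List.find?_cons_of_neg (by simp [hne])]
            exact hf
      · rintro (h | ⟨ht, hna, hf⟩)
        · exact Or.inl (List.mem_append.mpr (Or.inl h))
        · by_cases he1 : (e.1 == e'.1) = true
          · rw [List.find?_cons_of_pos (p := fun x : String × String => x.1 == e'.1) (a := e) he1] at hf
            simp only [Option.some.injEq] at hf
            exact Or.inl (List.mem_append.mpr (Or.inr (by simp [hf])))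
          · rw [List.find?_cons_of_neg (p := fun x : String × String => x.1 == e'.1) (a := e) he1] at hf
            refine Or.inr ⟨ht, ?_, hf⟩
            simp only [List.any_append, List.any_cons, List.any_nil, Bool.or_false]
            rw [hna, Bool.eq_false_iff.mpr he1]
            rfl
    · rw [if_neg hc]
      rcases ih acc seen hseen hnd with ⟨hm, hn⟩
      refine ⟨fun e' => ?_, hn⟩
      rw [hm e']
      have key : ∀ (ht : pvTgt.contains e'.1 = true) (hna : acc.any (fun e => e.1 == e'.1) = false),
          (e.1 == e'.1) = false := by
        intro ht hna
        cases h : (e.1 == e'.1)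
        · rfl
        · exfalso
          apply hc
          have he1 : e.1 = e'.1 := eq_of_beq h
          rw [Bool.and_eq_true]
          constructor
          · rw [he1]; exact ht
          · rw [he1, hseen, hna]; rfl
      constructor
      · rintro (h | ⟨ht, hna, hf⟩)
        · exact Or.inl h
        · exact Or.inr ⟨ht, hna, by rw [List.find?_cons_of_neg (by simp [key ht hna])]; exact hf⟩
      · rintro (h | ⟨ht, hna, hf⟩)
        · exact Or.inl h
        · rw [List.find?_cons_of_neg (by simp [key ht hna])] at hf
          exact Or.inr ⟨ht, hna, hf⟩

-- filterMap of an order-respecting partial map keeps strict key order.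
theorem pv_pair_filterMap {α β : Type} (g : α → Option β) (K : α → Nat) (key : β → Nat)
    (hg : ∀ a b, g a = some b → key b = K a) :
    ∀ l : List α, l.Pairwise (fun a a' => K a < K a') →
      (l.filterMap g).Pairwise (fun b b' => key b < key b') := by
  intro l
  induction l with
  | nil => intro _; simp
  | cons a l ih =>
    intro hp
    rcases List.pairwise_cons.mp hp with ⟨ha, hl⟩
    rw [List.filterMap_cons]
    rcases h : g a with _ | b
    · exact ih hl
    · refine List.pairwise_cons.mpr ⟨?_, ih hl⟩
      intro b' hb'
      rcases List.mem_filterMap.mp hb' with ⟨a', ha', hg'⟩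
      rw [hg a b h, hg a' b' hg']
      exact ha a' ha'

-- the sort key of B
def pvKey (e : String × String) : Nat := (PySem.List.index? pvTgt e.1).getD 0

-- pvTgt's ranks are strictly increasing along pvTgt.
theorem pv_tgt_pairwise : pvTgt.Pairwise (fun w w' => pvKey (w, "") < pvKey (w', "")) := by
  decide

-- The targeted_order-ordered list of first matches: strictly increasing keys.
theorem pv_T'_pairwise (pe : List (String × String)) :
    (pvTgt.filterMap (fun w => pe.find? (fun e => e.1 == w))).Pairwise
      (fun b b' => pvKey b < pvKey b') := by
  refine pv_pair_filterMap (fun w => pe.find? (fun e => e.1 == w)) (fun w => pvKey (w, "")) pvKey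
    ?_ pvTgt pv_tgt_pairwise
  intro w b hb
  have hb1 : b.1 = w := eq_of_beq (by simpa using List.find?_some hb)
  simp [pvKey, hb1]

-- Membership in the targeted_order-ordered list of first matches.
theorem pv_T'_mem (pe : List (String × String)) (e' : String × String) :
    e' ∈ pvTgt.filterMap (fun w => pe.find? (fun e => e.1 == w))
    ↔ (pvTgt.contains e'.1 = true ∧ pe.find? (fun e => e.1 == e'.1) = some e') := by
  rw [List.mem_filterMap]
  constructor
  · rintro ⟨w, hw, hf⟩
    have hb1 : e'.1 = w := eq_of_beq (by simpa using List.find?_some hf)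
    subst hb1
    exact ⟨List.elem_eq_true_of_mem hw, hf⟩
  · rintro ⟨ht, hf⟩
    exact ⟨e'.1, by simpa using ht, hf⟩

-- ===== VERDICT =====
theorem select_targeted_val_entries_py_spec : Claim_equal_select_targeted_val_entries_py := by
  intro pe c _
  unfold Spec_select_targeted_val_entries_py
  unfold select_targeted_val_entries_py select_targeted_val_entries_py_alt
  simp only []
  have hbase := pv_base_loop (max 0 c) pe [] 0
  simp only [Int.sub_zero, List.nil_append] at hbase
  rw [hbase, pv_tgt_loop]
  congr 1
  rcases pv_firsts_spec pe [] PySem.Set.empty (by intro x; rfl) (by simp) with ⟨hm, hn⟩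
  set F := (pe.foldl
      (fun (st : List (String × String) × PySem.Set String) e =>
        if pvTgt.contains e.1 && !(PySem.Set.contains st.2 e.1)
        then (st.1 ++ [e], PySem.Set.add st.2 e.1) else st)
      ([], PySem.Set.empty)).1 with hF
  set T' := pvTgt.filterMap (fun w => pe.find? (fun e => e.1 == w)) with hT'
  have hFmem : ∀ e', e' ∈ F ↔ (pvTgt.contains e'.1 = true ∧ pe.find? (fun e => e.1 == e'.1) = some e') := by
    intro e'
    rw [hm e']
    simp
  have hFnd : F.Nodup := List.Nodup.of_map Prod.fst hn
  have hT'pw : T'.Pairwise (fun b b' => pvKey b < pvKey b') := pv_T'_pairwise pe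
  have hT'nd : T'.Nodup :=
    List.Pairwise.imp (fun h => fun heq => by subst heq; exact lt_irrefl _ h) hT'pw
  have hperm : T'.Perm F := by
    rw [List.perm_ext_iff_of_nodup hT'nd hFnd]
    intro e'
    rw [hFmem e', pv_T'_mem pe e']
  exact (PySem.List.sorted_eq_of_perm_of_pairwise_lt F T' pvKey hperm hT'pw).symm
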